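-- pv_equiv track=rewrite | github.com/Gavinyw/HPP_Scanner | hpp_scanner/context_tracker.py | _is_privilege_escalation
-- ===== SOURCE A (Python) =====
-- def _is_privilege_escalation(old_role: str, new_role: str) -> bool:
--     """Check if role change represents privilege escalation."""
--     # Define role hierarchy (lower index = lower privilege)
--     role_hierarchy = ['guest', 'user', 'member', 'moderator', 'admin', 'superadmin', 'root']
--
--     old_idx = -1
--     new_idx = -1
--
--     for i, role in enumerate(role_hierarchy):
--         if old_role and role in old_role.lower():
--             old_idx = i
--         if new_role and role in new_role.lower():
--             new_idx = i
--
--     return new_idx > old_idx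
-- ===== SOURCE B (Python) =====
-- def _is_privilege_escalation(old_role: str, new_role: str) -> bool:
--     """Check if role change represents privilege escalation."""
--     hierarchy = ['guest', 'user', 'member', 'moderator', 'admin', 'superadmin', 'root']
--     ol = old_role.lower() if old_role else ''
--     nl = new_role.lower() if new_role else ''
--     # escalation iff some level matched by the new role has no old-role match at or above it
--     return any(
--         role in nl and all(r not in ol for r in hierarchy[i:])
--         for i, role in enumerate(hierarchy)
--     )
-- ===== Notes on version B (the rewrite author's own statement) =====
-- stated objective: alternative
-- what changed: A computes two running highest-match indices in one pass and compares them; B never computes an index: it returns the quantifier formulation any(role in new and all(r not in old for r in hierarchy[i:])), i.e. some level matched by the new role has no old-role match at or above it.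
import Mathlib
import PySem

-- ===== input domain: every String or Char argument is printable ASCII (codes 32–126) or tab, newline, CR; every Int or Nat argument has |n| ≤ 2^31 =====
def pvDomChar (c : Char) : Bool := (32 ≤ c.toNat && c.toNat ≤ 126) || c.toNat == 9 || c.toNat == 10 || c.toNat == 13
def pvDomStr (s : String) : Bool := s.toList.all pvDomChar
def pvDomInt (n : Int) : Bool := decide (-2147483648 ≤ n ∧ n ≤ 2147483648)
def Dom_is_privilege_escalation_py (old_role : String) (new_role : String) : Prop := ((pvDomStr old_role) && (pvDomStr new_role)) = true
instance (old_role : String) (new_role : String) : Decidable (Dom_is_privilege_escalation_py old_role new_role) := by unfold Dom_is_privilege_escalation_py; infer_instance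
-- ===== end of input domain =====

-- B replaces A's running-max index comparison (one low-to-high pass overwriting two
-- indices, then new_idx > old_idx) with a direct quantifier formulation: escalation iff
-- some hierarchy level matched by the new role has no old-role match at or above it
-- (any/all over enumerate and list suffixes). Objective: alternative decomposition.


def pvHier : List String := ["guest", "user", "member", "moderator", "admin", "superadmin", "root"]

-- ===== PORT A =====
-- single loop over enumerate(role_hierarchy) updating the two running indices,
-- then new_idx > old_idx
def is_privilege_escalation_py (old_role : String) (new_role : String) : Bool :=
  let st : Int × Int :=
    (PySem.List.enumerate pvHier).foldl
      (fun (p : Int × Int) (ir : Int × String) =>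
        ( if ((old_role != "") && PySem.Str.isIn ir.2 (PySem.Str.lower old_role)) = true then ir.1 else p.1,
          if ((new_role != "") && PySem.Str.isIn ir.2 (PySem.Str.lower new_role)) = true then ir.1 else p.2 ))
      (-1, -1)
  decide (st.1 < st.2)

-- ===== PORT B =====
-- Source B: ol/nl are the lowered roles (or '' for falsy input); return
-- any(role in nl and all(r not in ol for r in hierarchy[i:]) for i, role in enumerate(hierarchy))
def is_privilege_escalation_py_alt (old_role : String) (new_role : String) : Bool :=
  let ol : String := if (old_role != "") = true then PySem.Str.lower old_role else ""
  let nl : String := if (new_role != "") = true then PySem.Str.lower new_role else ""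
  (PySem.List.enumerate pvHier).any (fun ir =>
    PySem.Str.isIn ir.2 nl &&
      (PySem.List.slice pvHier (some ir.1) none).all (fun r => !(PySem.Str.isIn r ol)))

-- ===== PRECONDITION & SPEC =====
def Spec_is_privilege_escalation_py (old_role : String) (new_role : String) (out : Bool) : Prop := out = is_privilege_escalation_py_alt old_role new_role
instance (old_role : String) (new_role : String) (out : Bool) : Decidable (Spec_is_privilege_escalation_py old_role new_role out) := by unfold Spec_is_privilege_escalation_py; infer_instance

-- ===== CLAIM =====
def Claim_equal_is_privilege_escalation_py : Prop := ∀ (old_role : String) (new_role : String), Dom_is_privilege_escalation_py old_role new_role → Spec_is_privilege_escalation_py old_role new_role (is_privilege_escalation_py old_role new_role)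

-- ===== LEMMAS AND PROOFS =====

-- a role of the hierarchy is never a substring of the empty string
theorem pv_isIn_lowered (r s : String) (hr : r.toList ≠ []) :
    PySem.Str.isIn r (if (s != "") = true then PySem.Str.lower s else "")
    = ((s != "") && PySem.Str.isIn r (PySem.Str.lower s)) := by
  by_cases h : s = ""
  · subst h
    simp only [bne_self_eq_false, if_neg Bool.false_ne_true, Bool.false_and]
    simp only [PySem.Str.isIn_eq, String.toList_empty]
    simp [PySem.Chars.isIn_eq_false_iff, hr]
  · simp [h]

-- the seven closed slice terms of B's port, evaluated
theorem pvSlice0 : PySem.List.slice ["guest", "user", "member", "moderator", "admin", "superadmin", "root"] (some 0) none = ["guest", "user", "member", "moderator", "admin", "superadmin", "root"] := rfl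
theorem pvSlice1 : PySem.List.slice ["guest", "user", "member", "moderator", "admin", "superadmin", "root"] (some (0 + 1)) none = ["user", "member", "moderator", "admin", "superadmin", "root"] := rfl
theorem pvSlice2 : PySem.List.slice ["guest", "user", "member", "moderator", "admin", "superadmin", "root"] (some (0 + 1 + 1)) none = ["member", "moderator", "admin", "superadmin", "root"] := rfl
theorem pvSlice3 : PySem.List.slice ["guest", "user", "member", "moderator", "admin", "superadmin", "root"] (some (0 + 1 + 1 + 1)) none = ["moderator", "admin", "superadmin", "root"] := rfl
theorem pvSlice4 : PySem.List.slice ["guest", "user", "member", "moderator", "admin", "superadmin", "root"] (some (0 + 1 + 1 + 1 + 1)) none = ["admin", "superadmin", "root"] := rfl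
theorem pvSlice5 : PySem.List.slice ["guest", "user", "member", "moderator", "admin", "superadmin", "root"] (some (0 + 1 + 1 + 1 + 1 + 1)) none = ["superadmin", "root"] := rfl
theorem pvSlice6 : PySem.List.slice ["guest", "user", "member", "moderator", "admin", "superadmin", "root"] (some (0 + 1 + 1 + 1 + 1 + 1 + 1)) none = ["root"] := rfl

-- ===== VERDICT =====
theorem is_privilege_escalation_py_spec : Claim_equal_is_privilege_escalation_py := by
  intro old_role new_role _
  unfold Spec_is_privilege_escalation_py is_privilege_escalation_py is_privilege_escalation_py_alt
  simp only [pvHier, PySem.List.enumerate_cons, PySem.List.enumerate_nil, List.foldl, List.any,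
    List.all, pvSlice0, pvSlice1, pvSlice2, pvSlice3, pvSlice4, pvSlice5, pvSlice6,
    pv_isIn_lowered "guest" _ (by decide), pv_isIn_lowered "user" _ (by decide),
    pv_isIn_lowered "member" _ (by decide), pv_isIn_lowered "moderator" _ (by decide),
    pv_isIn_lowered "admin" _ (by decide), pv_isIn_lowered "superadmin" _ (by decide),
    pv_isIn_lowered "root" _ (by decide)]
  generalize ((old_role != "") && PySem.Str.isIn "guest" (PySem.Str.lower old_role)) = o0
  generalize ((old_role != "") && PySem.Str.isIn "user" (PySem.Str.lower old_role)) = o1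
  generalize ((old_role != "") && PySem.Str.isIn "member" (PySem.Str.lower old_role)) = o2
  generalize ((old_role != "") && PySem.Str.isIn "moderator" (PySem.Str.lower old_role)) = o3
  generalize ((old_role != "") && PySem.Str.isIn "admin" (PySem.Str.lower old_role)) = o4
  generalize ((old_role != "") && PySem.Str.isIn "superadmin" (PySem.Str.lower old_role)) = o5
  generalize ((old_role != "") && PySem.Str.isIn "root" (PySem.Str.lower old_role)) = o6
  generalize ((new_role != "") && PySem.Str.isIn "guest" (PySem.Str.lower new_role)) = n0
  generalize ((new_role != "") && PySem.Str.isIn "user" (PySem.Str.lower new_role)) = n1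
  generalize ((new_role != "") && PySem.Str.isIn "member" (PySem.Str.lower new_role)) = n2
  generalize ((new_role != "") && PySem.Str.isIn "moderator" (PySem.Str.lower new_role)) = n3
  generalize ((new_role != "") && PySem.Str.isIn "admin" (PySem.Str.lower new_role)) = n4
  generalize ((new_role != "") && PySem.Str.isIn "superadmin" (PySem.Str.lower new_role)) = n5
  generalize ((new_role != "") && PySem.Str.isIn "root" (PySem.Str.lower new_role)) = n6
  revert o0 o1 o2 o3 o4 o5 o6 n0 n1 n2 n3 n4 n5 n6
  decide
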